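-- pv_equiv track=rewrite | github.com/livekit/livekit_composite | summarize_changes.py | categorize_files_by_subproject
-- ===== SOURCE A (Python) =====
-- def categorize_files_by_subproject(changed_files: list) -> dict:
--     """Categorize changed files by individual repositories/projects for detailed analysis."""
--     subprojects = {}
--
--     for file in changed_files:
--         # Skip root directory files (tool files)
--         if '/' not in file:
--             continue
--
--         # Extract the subproject path (first two levels)
--         parts = file.split('/')
--         if len(parts) >= 2:
--             subproject_key = f"{parts[0]}/{parts[1]}"
--         else:
--             subproject_key = parts[0]
--
--         # Special handling for specific patterns
--         if file.startswith('livekit/client-sdk-'):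
--             # Extract the specific client SDK (e.g., client-sdk-js, client-sdk-swift)
--             sdk_name = parts[1] if len(parts) > 1 else "client-sdk"
--             subproject_key = f"livekit/{sdk_name}"
--         elif file.startswith('livekit/agents-js/'):
--             subproject_key = "livekit/agents-js"
--         elif file.startswith('livekit/agents/'):
--             subproject_key = "livekit/agents"
--         elif file.startswith('livekit-examples/'):
--             # For examples, use the specific example name
--             if len(parts) >= 2:
--                 subproject_key = f"livekit-examples/{parts[1]}"
--             else:
--                 subproject_key = "livekit-examples"
--         elif file.startswith('knowledge_base/'):
--             subproject_key = "knowledge_base"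
--
--         if subproject_key not in subprojects:
--             subprojects[subproject_key] = []
--         subprojects[subproject_key].append(file)
--
--     return subprojects
-- ===== SOURCE B (Python) =====
-- def _subproject_key(file):
--     """Subproject key of a path that contains '/'."""
--     parts = file.split('/')
--     if file.startswith('livekit/client-sdk-'):
--         return "livekit/" + (parts[1] if len(parts) > 1 else "client-sdk")
--     if file.startswith('livekit/agents-js/'):
--         return "livekit/agents-js"
--     if file.startswith('livekit/agents/'):
--         return "livekit/agents"
--     if file.startswith('livekit-examples/'):
--         return ("livekit-examples/" + parts[1]) if len(parts) >= 2 else "livekit-examples"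
--     if file.startswith('knowledge_base/'):
--         return "knowledge_base"
--     return (parts[0] + "/" + parts[1]) if len(parts) >= 2 else parts[0]
--
--
-- def categorize_files_by_subproject(changed_files: list) -> dict:
--     """Categorize changed files by individual repositories/projects for detailed analysis."""
--     pairs = [(_subproject_key(f), f) for f in changed_files if '/' in f]
--     keys = list(dict.fromkeys(k for k, _ in pairs))
--     return {k: [f for kk, f in pairs if kk == k] for k in keys}
-- ===== Notes on version B (the rewrite author's own statement) =====
-- stated objective: alternative
-- what changed: Replaces A's single-pass dict accumulation (insert-empty-then-append per file) with a map/dedup/group decomposition: compute each non-root file's key once into a (key, file) list, dedup the keys in first-occurrence order, and build each group by a comprehension over the pair list.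
import Mathlib
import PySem

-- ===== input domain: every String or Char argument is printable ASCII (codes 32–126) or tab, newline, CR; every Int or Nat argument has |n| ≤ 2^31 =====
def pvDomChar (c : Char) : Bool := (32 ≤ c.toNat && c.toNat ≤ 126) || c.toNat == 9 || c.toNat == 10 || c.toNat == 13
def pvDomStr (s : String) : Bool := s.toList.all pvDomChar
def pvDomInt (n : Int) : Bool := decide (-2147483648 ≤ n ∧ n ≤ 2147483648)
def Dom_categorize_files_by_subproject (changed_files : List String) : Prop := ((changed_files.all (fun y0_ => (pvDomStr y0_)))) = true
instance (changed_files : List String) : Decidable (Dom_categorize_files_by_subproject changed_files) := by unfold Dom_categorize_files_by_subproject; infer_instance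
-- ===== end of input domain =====

-- B replaces A's single-pass dict accumulation with a map/dedup/group decomposition (objective: alternative).


-- ===== PORT A =====
-- loop body of A's for-loop, named for use in the proofs; a literal transliteration of the body
def pvStepA (subprojects : PySem.Dict String (List String)) (file : String) : PySem.Dict String (List String) :=
  -- if '/' not in file: continue
  if PySem.Str.isIn "/" file = false then subprojects
  else
    -- parts = file.split('/')  ('/' is a non-empty literal, so split? is always `some`)
    let parts := (PySem.Str.split? file "/").getD []
    -- default key: first two levels
    let key0 : String := if 2 ≤ parts.length then parts[0]! ++ "/" ++ parts[1]! else parts[0]!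
    let subproject_key : String :=
      if PySem.Str.startswith file "livekit/client-sdk-" then
        "livekit/" ++ (if 1 < parts.length then parts[1]! else "client-sdk")
      else if PySem.Str.startswith file "livekit/agents-js/" then "livekit/agents-js"
      else if PySem.Str.startswith file "livekit/agents/" then "livekit/agents"
      else if PySem.Str.startswith file "livekit-examples/" then
        if 2 ≤ parts.length then "livekit-examples/" ++ parts[1]! else "livekit-examples"
      else if PySem.Str.startswith file "knowledge_base/" then "knowledge_base"
      else key0
    -- if subproject_key not in subprojects: subprojects[subproject_key] = []
    let subprojects :=
      if subprojects.contains subproject_key = false then subprojects.insert subproject_key []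
      else subprojects
    -- subprojects[subproject_key].append(file)
    subprojects.modify subproject_key [] (· ++ [file])

def categorize_files_by_subproject (changed_files : List String) : List (String × List String) :=
  (changed_files.foldl pvStepA PySem.Dict.empty).items

-- ===== PORT B =====
-- B's helper _subproject_key, transliterated
def pvSubkey (file : String) : String :=
  let parts := (PySem.Str.split? file "/").getD []
  if PySem.Str.startswith file "livekit/client-sdk-" then
    "livekit/" ++ (if 1 < parts.length then parts[1]! else "client-sdk")
  else if PySem.Str.startswith file "livekit/agents-js/" then "livekit/agents-js"
  else if PySem.Str.startswith file "livekit/agents/" then "livekit/agents"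
  else if PySem.Str.startswith file "livekit-examples/" then
    if 2 ≤ parts.length then "livekit-examples/" ++ parts[1]! else "livekit-examples"
  else if PySem.Str.startswith file "knowledge_base/" then "knowledge_base"
  else if 2 ≤ parts.length then parts[0]! ++ "/" ++ parts[1]! else parts[0]!

def categorize_files_by_subproject_alt (changed_files : List String) : List (String × List String) :=
  -- pairs = [(_subproject_key(f), f) for f in changed_files if '/' in f]
  let pairs := (changed_files.filter (fun f => PySem.Str.isIn "/" f)).map (fun f => (pvSubkey f, f))
  -- keys = list(dict.fromkeys(k for k, _ in pairs))
  let keys := PySem.List.dedup (pairs.map (fun p => p.1))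
  -- {k: [f for kk, f in pairs if kk == k] for k in keys}: keys are distinct and in order,
  -- so the comprehension dict's items are exactly this map
  keys.map (fun k => (k, (pairs.filter (fun p => p.1 == k)).map (fun p => p.2)))

-- ===== PRECONDITION & SPEC =====
def Spec_categorize_files_by_subproject (changed_files : List String) (out : List (String × List String)) : Prop := out = categorize_files_by_subproject_alt changed_files
instance (changed_files : List String) (out : List (String × List String)) : Decidable (Spec_categorize_files_by_subproject changed_files out) := by unfold Spec_categorize_files_by_subproject; infer_instance

-- ===== CLAIM (what is proved, stated in full; the proofs are below) =====
def Claim_equal_categorize_files_by_subproject : Prop := ∀ (changed_files : List String), Dom_categorize_files_by_subproject changed_files → Spec_categorize_files_by_subproject changed_files (categorize_files_by_subproject changed_files)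

-- ===== LEMMAS AND PROOFS =====

-- "insert [] if absent, then append" is exactly `modify key [] (· ++ [file])`
lemma pv_setdefault_modify (d : PySem.Dict String (List String)) (k : String) (f : String) :
    (if d.contains k = false then d.insert k [] else d).modify k [] (· ++ [f])
      = d.modify k [] (· ++ [f]) := by
  by_cases hc : d.contains k = false
  · simp only [hc, if_true, PySem.Dict.modify, PySem.Dict.getD_insert_self,
      PySem.Dict.insert_insert_self, PySem.Dict.getD_of_not_contains d [] hc]
  · simp [hc]

-- A's loop body, rewritten through B's key function
lemma pv_stepA_eq (d : PySem.Dict String (List String)) (file : String) :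
    pvStepA d file
      = if PySem.Str.isIn "/" file then d.modify (pvSubkey file) [] (· ++ [file]) else d := by
  cases h : PySem.Str.isIn "/" file with
  | false =>
    simp only [pvStepA, h]
    simp
  | true =>
    simp only [pvStepA, h, Bool.true_eq_false, if_false, if_true, pvSubkey]
    exact pv_setdefault_modify d _ file

-- the grouping fold over (key, file) pairs, characterised as B builds it
lemma pv_items (pairs : List (String × String)) :
    (List.foldl (fun d p => d.modify p.1 [] (· ++ [p.2])) PySem.Dict.empty pairs).items
      = (PySem.List.dedup (pairs.map (fun p => p.1))).map
          (fun k => (k, (pairs.filter (fun p => p.1 == k)).map (fun p => p.2))) := by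
  have hnod : (List.foldl (fun d p => d.modify p.1 [] (· ++ [p.2])) PySem.Dict.empty pairs).keys.Nodup :=
    PySem.Dict.nodup_keys_foldl_modify_key pairs Prod.fst [] (fun _ p v => v ++ [p.2])
      PySem.Dict.empty PySem.Dict.nodup_keys_empty
  rw [PySem.Dict.items_eq_map_keys _ hnod []]
  rw [PySem.Dict.keys_foldl_modify_key pairs Prod.fst [] (fun _ p v => v ++ [p.2]) PySem.Dict.empty]
  have hkeys : PySem.Set.update (PySem.Dict.empty : PySem.Dict String (List String)).keys (pairs.map Prod.fst)
      = PySem.List.dedup (pairs.map (fun p => p.1)) := by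
    simp [PySem.Set.update, PySem.List.dedup_eq_ofList, PySem.Set.ofList_eq_foldl, PySem.Dict.keys,
      PySem.Dict.empty]
  rw [hkeys]
  refine List.map_congr_left (fun k _ => ?_)
  rw [PySem.Dict.getD_foldl_modify_append pairs PySem.Dict.empty k]
  simp

theorem pv_main (changed_files : List String) :
    categorize_files_by_subproject changed_files = categorize_files_by_subproject_alt changed_files := by
  unfold categorize_files_by_subproject categorize_files_by_subproject_alt
  rw [PySem.List.foldl_congr_mem changed_files pvStepA
      (fun d f => if PySem.Str.isIn "/" f then d.modify (pvSubkey f) [] (· ++ [f]) else d)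
      PySem.Dict.empty (fun d f _ => pv_stepA_eq d f)]
  simp only [PySem.List.foldl_if_eq_foldl_filter]
  rw [show (List.foldl (fun d f => d.modify (pvSubkey f) [] (· ++ [f])) PySem.Dict.empty
        (changed_files.filter (fun f => PySem.Str.isIn "/" f)))
      = (List.foldl (fun d p => d.modify p.1 [] (· ++ [p.2])) PySem.Dict.empty
        ((changed_files.filter (fun f => PySem.Str.isIn "/" f)).map (fun f => (pvSubkey f, f))))
    from (List.foldl_map (f := fun f => (pvSubkey f, f))
      (g := fun (d : PySem.Dict String (List String)) (p : String × String) =>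
        d.modify p.1 [] (· ++ [p.2]))).symm]
  exact pv_items _

-- ===== VERDICT (by name: the statement is the Claim_ definition above) =====
theorem categorize_files_by_subproject_spec : Claim_equal_categorize_files_by_subproject := by
  intro changed_files _
  unfold Spec_categorize_files_by_subproject
  exact pv_main changed_files
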